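-- pv_equiv track=rewrite | github.com/msd2/three_words_dashboard | components/tokenize_text.py | common_word_swaps
-- ===== SOURCE A (Python) =====
-- def common_word_swaps(tokens):
--     words = {
--         'entertain':'entertaining',
--         'enjoy':'enjoyable',
--         'provoke':'provoking',
--         'joyous':'joyful',
--         'amuse':'amusing',
--         'gre':'grey',
--         'ok':'okay',
--         '""""':''
--         # 'fee':'',
--         # 'fhjhffhjkhhh':''
--     }
--     for key in words.keys():
--         tokens = [words[key] if token==key else token for token in tokens]
--     return tokens
-- ===== SOURCE B (Python) =====
-- def _swap(token):
--     if token == 'entertain':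
--         return 'entertaining'
--     elif token == 'enjoy':
--         return 'enjoyable'
--     elif token == 'provoke':
--         return 'provoking'
--     elif token == 'joyous':
--         return 'joyful'
--     elif token == 'amuse':
--         return 'amusing'
--     elif token == 'gre':
--         return 'grey'
--     elif token == 'ok':
--         return 'okay'
--     elif token == '""""':
--         return ''
--     else:
--         return token
--
--
-- def common_word_swaps(tokens):
--     acc = []
--     for token in tokens:
--         acc.append(_swap(token))
--     return acc
-- ===== Notes on version B (the rewrite author's own statement) =====
-- stated objective: simpler
-- what changed: A builds a dictionary and rebuilds the whole token list once per key (8 full passes); B drops the dictionary entirely and makes a single accumulator loop over the tokens, deciding each token with a direct if/elif chain. Equivalent because the keys are distinct and no replacement value is itself a key, so the staged passes cannot cascade.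
import Mathlib
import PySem

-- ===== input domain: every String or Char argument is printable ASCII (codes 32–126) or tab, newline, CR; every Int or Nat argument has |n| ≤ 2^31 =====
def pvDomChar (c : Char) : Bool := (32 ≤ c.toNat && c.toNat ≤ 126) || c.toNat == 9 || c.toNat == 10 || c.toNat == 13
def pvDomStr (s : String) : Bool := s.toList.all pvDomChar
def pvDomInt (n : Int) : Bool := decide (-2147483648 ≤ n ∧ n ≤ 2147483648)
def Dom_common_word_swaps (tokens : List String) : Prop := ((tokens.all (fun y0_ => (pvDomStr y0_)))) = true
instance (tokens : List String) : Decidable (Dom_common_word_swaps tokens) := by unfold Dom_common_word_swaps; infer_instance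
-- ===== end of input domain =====

-- B replaces A's per-key rebuilds of the whole list with one accumulator pass and an
-- if/elif chain per token (objective: simpler; no dictionary at all).

-- ===== PORT A =====
-- A's dictionary, then one full rebuild of the token list per key (as in the Python).
def pvWordsA : PySem.Dict String String :=
  PySem.Dict.ofList [("entertain","entertaining"),("enjoy","enjoyable"),("provoke","provoking"),
    ("joyous","joyful"),("amuse","amusing"),("gre","grey"),("ok","okay"),("\"\"\"\"","")]

def common_word_swaps (tokens : List String) : List String :=
  pvWordsA.keys.foldl
    (fun ts key => ts.map (fun token => if token == key then (pvWordsA.get? key).getD "" else token))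
    tokens

-- ===== PORT B =====
-- _swap: the if/elif chain of Source B.
def pvSwap (token : String) : String :=
  if token == "entertain" then "entertaining"
  else if token == "enjoy" then "enjoyable"
  else if token == "provoke" then "provoking"
  else if token == "joyous" then "joyful"
  else if token == "amuse" then "amusing"
  else if token == "gre" then "grey"
  else if token == "ok" then "okay"
  else if token == "\"\"\"\"" then ""
  else token

-- the accumulator loop of Source B: acc = []; for token in tokens: acc.append(_swap(token))
def common_word_swaps_alt (tokens : List String) : List String :=
  tokens.foldl (fun acc token => acc ++ [pvSwap token]) []

-- ===== PRECONDITION & SPEC =====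
def Spec_common_word_swaps (tokens : List String) (out : List String) : Prop := out = common_word_swaps_alt tokens
instance (tokens : List String) (out : List String) : Decidable (Spec_common_word_swaps tokens out) := by unfold Spec_common_word_swaps; infer_instance

-- ===== CLAIM =====
def Claim_equal_common_word_swaps : Prop := ∀ (tokens : List String), Dom_common_word_swaps tokens → Spec_common_word_swaps tokens (common_word_swaps tokens)

-- ===== LEMMAS AND PROOFS =====
lemma pvWordsA_mk : pvWordsA = PySem.Dict.mk [("entertain","entertaining"),("enjoy","enjoyable"),
    ("provoke","provoking"),("joyous","joyful"),("amuse","amusing"),("gre","grey"),("ok","okay"),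
    ("\"\"\"\"","")] := by decide

-- Pointwise: the eight replacement steps applied in order to one token equal B's chain.
lemma pv_point (t : String) :
    (pvWordsA.keys.foldl
      (fun s key => if s == key then (pvWordsA.get? key).getD "" else s) t)
    = pvSwap t := by
  by_cases h1 : t = "entertain"; · subst h1; decide
  by_cases h2 : t = "enjoy"; · subst h2; decide
  by_cases h3 : t = "provoke"; · subst h3; decide
  by_cases h4 : t = "joyous"; · subst h4; decide
  by_cases h5 : t = "amuse"; · subst h5; decide
  by_cases h6 : t = "gre"; · subst h6; decide
  by_cases h7 : t = "ok"; · subst h7; decide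
  by_cases h8 : t = "\"\"\"\""; · subst h8; decide
  rw [pvWordsA_mk]
  simp [pvSwap, PySem.Dict.get?, h1, h2, h3, h4, h5, h6, h7, h8]

-- The fold of per-key maps is the map of the per-token fold.
lemma pv_fold_map (keys : List String) (f : String → String → String) (tokens : List String) :
    keys.foldl (fun ts key => ts.map (fun token => f token key)) tokens
    = tokens.map (fun t => keys.foldl f t) := by
  induction keys generalizing tokens with
  | nil => simp
  | cons k ks ih => simp [List.foldl, ih, List.map_map, Function.comp]

-- B's append-accumulator fold computes the map of pvSwap.
lemma pv_alt_map (tokens : List String) (acc : List String) :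
    tokens.foldl (fun acc token => acc ++ [pvSwap token]) acc = acc ++ tokens.map pvSwap := by
  induction tokens generalizing acc with
  | nil => simp
  | cons t ts ih => simp [List.foldl, ih]

-- ===== VERDICT =====
theorem common_word_swaps_spec : Claim_equal_common_word_swaps := by
  intro tokens _
  unfold Spec_common_word_swaps common_word_swaps common_word_swaps_alt
  rw [pv_fold_map, pv_alt_map]
  exact List.map_congr_left (fun t _ => pv_point t)
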